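-- pv_equiv track=rewrite | github.com/dmitry957/codewars-training | kata/7-kyu/circle-cipher/solution.py | circle_cipher
-- ===== SOURCE A (Python) =====
-- def circle_cipher(s:str, is_decode:bool) -> str:
--     result = [''] * len(s)
--     left, right = 0, len(s) - 1
--     index = 0
--     while left <= right:
--         if not is_decode:
--             result[index] = s[left]
--             if index + 1 < len(s):
--                 result[index + 1] = s[right]
--         else:
--             result[left] = s[index]
--             if index + 1 < len(s):
--                 result[right] = s[index + 1]
--         index += 2
--         left += 1
--         right -= 1
--     return ''.join(result)
-- ===== SOURCE B (Python) =====
-- def circle_cipher(s: str, is_decode: bool) -> str: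
--     n = len(s)
--     k = (n + 1) // 2
--     if is_decode:
--         return s[0::2] + s[1::2][::-1]
--     front = s[:k]
--     back = s[k:][::-1]
--     out = []
--     for i in range(k):
--         out.append(front[i])
--         if i < len(back):
--             out.append(back[i])
--     return ''.join(out)
-- ===== Notes on version B (the rewrite author's own statement) =====
-- stated objective: simpler
-- what changed: A fills a preallocated buffer with a two-pointer (left/right/index) while loop; B branches on is_decode up front and works on string halves: decode is the closed form s[0::2] + s[1::2][::-1], encode splits the string at (n+1)//2 and interleaves the front half with the reversed back half.
import Mathlib
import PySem

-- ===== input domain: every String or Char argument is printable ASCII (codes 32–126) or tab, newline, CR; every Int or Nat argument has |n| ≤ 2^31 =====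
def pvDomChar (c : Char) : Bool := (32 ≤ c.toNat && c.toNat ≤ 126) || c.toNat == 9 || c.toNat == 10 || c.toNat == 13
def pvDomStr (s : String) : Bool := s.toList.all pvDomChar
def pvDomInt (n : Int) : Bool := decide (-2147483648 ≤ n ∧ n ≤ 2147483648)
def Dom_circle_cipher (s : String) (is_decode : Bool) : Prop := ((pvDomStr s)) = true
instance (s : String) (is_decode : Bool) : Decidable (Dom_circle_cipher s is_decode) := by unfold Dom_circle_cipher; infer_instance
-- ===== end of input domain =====

-- B replaces A's two-pointer in-place permutation loop by half-splitting: decode is the closed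
-- form s[0::2] + s[1::2][::-1], encode interleaves the front half with the reversed back half.

-- ===== PORT A =====
-- Faithful port of A's while loop.  `List.getD _ _ 'x'` / `.toNat` for s[left], s[right],
-- s[index], s[index+1] is exact: on every reachable state these indices satisfy
-- 0 ≤ left ≤ right < len(s) and index (+1) < len(s), so Python never raises and never
-- sees a negative index here.
def circleLoopA (l : List Char) (res : List String) (left : Nat) (right : Int) (index : Nat)
    (is_decode : Bool) : List String :=
  if (left : Int) ≤ right then
    let res' :=
      if !is_decode then
        let r1 := res.set index (String.singleton (l.getD left 'x'))
        if index + 1 < l.length then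
          r1.set (index + 1) (String.singleton (l.getD right.toNat 'x'))
        else r1
      else
        let r1 := res.set left (String.singleton (l.getD index 'x'))
        if index + 1 < l.length then
          r1.set right.toNat (String.singleton (l.getD (index + 1) 'x'))
        else r1
    circleLoopA l res' (left + 1) (right - 1) (index + 2) is_decode
  else res
termination_by (right + 1 - left).toNat
decreasing_by omega

def circle_cipher (s : String) (is_decode : Bool) : String :=
  let l := s.toList
  PySem.Str.join "" (circleLoopA l (List.replicate l.length "") 0 ((l.length : Int) - 1) 0 is_decode)

-- ===== PORT B =====
-- Port of Source B.  The extended slices s[0::2] / s[1::2] are PySem.List.slice?; the step literal 2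
-- is nonzero, so the Option is always `some` and `.getD []` never sees `none`.
def circle_cipher_alt (s : String) (is_decode : Bool) : String :=
  let l := s.toList
  let n := l.length
  let k := (n + 1) / 2
  if is_decode then
    String.ofList (((PySem.List.slice? l (some 0) none 2).getD []) ++
               ((PySem.List.slice? l (some 1) none 2).getD []).reverse)
  else
    let front := PySem.List.slice l none (some (k : Int))
    let back := (PySem.List.slice l (some (k : Int)) none).reverse
    let out := (List.range k).foldl (fun acc i =>
      let acc' := acc ++ [front.getD i 'x']
      if i < back.length then acc' ++ [back.getD i 'x'] else acc') []
    String.ofList out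

-- ===== PRECONDITION & SPEC =====
def Spec_circle_cipher (s : String) (is_decode : Bool) (out : String) : Prop := out = circle_cipher_alt s is_decode
instance (s : String) (is_decode : Bool) (out : String) : Decidable (Spec_circle_cipher s is_decode out) := by unfold Spec_circle_cipher; infer_instance

-- ===== CLAIM (what is proved, stated in full; the proofs are below) =====
def Claim_equal_circle_cipher : Prop := ∀ (s : String) (is_decode : Bool), Dom_circle_cipher s is_decode → Spec_circle_cipher s is_decode (circle_cipher s is_decode)

-- ===== LEMMAS AND PROOFS =====

-- the character at position j of the encoded string, resp. of the decoded string
def specE (l : List Char) (j : Nat) : Char :=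
  if j % 2 = 0 then l.getD (j / 2) 'x' else l.getD (l.length - 1 - j / 2) 'x'

def specD (l : List Char) (j : Nat) : Char :=
  if j < (l.length + 1) / 2 then l.getD (2 * j) 'x' else l.getD (2 * (l.length - 1 - j) + 1) 'x'

-- every second element, starting at the head
def evens : List Char → List Char
  | [] => []
  | [c] => [c]
  | c :: _ :: t => c :: evens t


lemma loopA_enc (l : List Char) : ∀ (m left : Nat) (res : List String),
    res.length = l.length → l.length ≤ 2 * left + m →
    (circleLoopA l res left ((l.length : Int) - 1 - left) (2 * left) false).length = l.length ∧
    ∀ j : Nat, (circleLoopA l res left ((l.length : Int) - 1 - left) (2 * left) false)[j]? =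
      if 2 * left ≤ j ∧ j < l.length then some (String.singleton (specE l j)) else res[j]? := by
  intro m
  induction m with
  | zero =>
    intro left res hres hm
    rw [circleLoopA]
    rw [if_neg (by omega)]
    refine ⟨hres, fun j => ?_⟩
    rw [if_neg (by omega)]
  | succ m ih =>
    intro left res hres hm
    rw [circleLoopA]
    by_cases hc : (left : Int) ≤ (l.length : Int) - 1 - (left : Nat)
    · rw [if_pos hc]
      simp only [Bool.not_false, if_true]
      set n := l.length with hn
      have hlt : 2 * left + 1 ≤ n := by omega
      have hrt : ((n : Int) - 1 - (left : Nat)).toNat = n - 1 - left := by omega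
      -- the updated buffer
      set r1 : List String := res.set (2 * left) (String.singleton (l.getD left 'x')) with hr1
      set res' : List String :=
        if 2 * left + 1 < n then
          r1.set (2 * left + 1) (String.singleton (l.getD ((n : Int) - 1 - (left : Nat)).toNat 'x'))
        else r1 with hres'
      have hres'len : res'.length = n := by
        by_cases h2 : 2 * left + 1 < n <;> simp [hres', h2, hr1, hres]
      have harith : ((n : Int) - 1 - (left : Nat)) - 1 = (n : Int) - 1 - ((left + 1 : Nat) : Int) := by
        push_cast; ring
      have h2l : 2 * left + 2 = 2 * (left + 1) := by ring
      have := ih (left + 1) res' hres'len (by omega)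
      rw [← h2l, ← harith] at this
      refine ⟨this.1, fun j => ?_⟩
      rw [this.2 j]
      by_cases hj1 : 2 * left + 2 ≤ j ∧ j < n
      · rw [if_pos hj1, if_pos (by omega)]
      · rw [if_neg hj1]
        by_cases hj2 : 2 * left ≤ j ∧ j < n
        · rw [if_pos hj2]
          -- j = 2*left or j = 2*left+1
          by_cases hje : j = 2 * left
          · subst hje
            have h1 : r1[2 * left]? = some (String.singleton (l.getD left 'x')) := by
              simp [hr1, List.getElem?_set, hres]; omega
            have hspec : specE l (2 * left) = l.getD left 'x' := by
              simp [specE]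
            by_cases h2 : 2 * left + 1 < n
            · simp only [hres', if_pos h2]
              rw [List.getElem?_set_ne (by omega), h1, hspec]
            · simp only [hres', if_neg h2, h1, hspec]
          · have hje2 : j = 2 * left + 1 := by omega
            subst hje2
            have h2 : 2 * left + 1 < n := by omega
            simp only [hres', if_pos h2]
            rw [List.getElem?_set_self (by simp [hr1, hres]; omega)]
            have hspec : specE l (2 * left + 1) = l.getD (n - 1 - left) 'x' := by
              have : (2 * left + 1) % 2 = 1 := by omega
              have hd : (2 * left + 1) / 2 = left := by omega
              simp [specE, this, hd, hn]
            rw [hrt, hspec]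
        · rw [if_neg hj2]
          -- untouched position
          by_cases h2 : 2 * left + 1 < n
          · simp only [hres', if_pos h2, hr1]
            rw [List.getElem?_set_ne (by omega), List.getElem?_set_ne (by omega)]
          · simp only [hres', if_neg h2, hr1]
            rw [List.getElem?_set_ne (by omega)]
    · rw [if_neg hc]
      refine ⟨hres, fun j => ?_⟩
      rw [if_neg (by omega)]

lemma loopA_dec (l : List Char) : ∀ (m left : Nat) (res : List String),
    res.length = l.length → l.length ≤ 2 * left + m →
    (circleLoopA l res left ((l.length : Int) - 1 - left) (2 * left) true).length = l.length ∧
    ∀ j : Nat, (circleLoopA l res left ((l.length : Int) - 1 - left) (2 * left) true)[j]? =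
      if left ≤ j ∧ j + left < l.length then some (String.singleton (specD l j)) else res[j]? := by
  intro m
  induction m with
  | zero =>
    intro left res hres hm
    rw [circleLoopA]
    rw [if_neg (by omega)]
    refine ⟨hres, fun j => ?_⟩
    rw [if_neg (by omega)]
  | succ m ih =>
    intro left res hres hm
    rw [circleLoopA]
    by_cases hc : (left : Int) ≤ (l.length : Int) - 1 - (left : Nat)
    · rw [if_pos hc]
      simp only [Bool.not_true, Bool.false_eq_true, if_false]
      set n := l.length with hn
      have hlt : 2 * left + 1 ≤ n := by omega
      have hrt : ((n : Int) - 1 - (left : Nat)).toNat = n - 1 - left := by omega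
      set r1 : List String := res.set left (String.singleton (l.getD (2 * left) 'x')) with hr1
      set res' : List String :=
        if 2 * left + 1 < n then
          r1.set ((n : Int) - 1 - (left : Nat)).toNat (String.singleton (l.getD (2 * left + 1) 'x'))
        else r1 with hres'
      have hres'len : res'.length = n := by
        by_cases h2 : 2 * left + 1 < n <;> simp [hres', h2, hr1, hres]
      have harith : ((n : Int) - 1 - (left : Nat)) - 1 = (n : Int) - 1 - ((left + 1 : Nat) : Int) := by
        push_cast; ring
      have h2l : 2 * left + 2 = 2 * (left + 1) := by ring
      have := ih (left + 1) res' hres'len (by omega)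
      rw [← h2l, ← harith] at this
      refine ⟨this.1, fun j => ?_⟩
      rw [this.2 j]
      have hk2 : 2 * ((n + 1) / 2) = n ∨ 2 * ((n + 1) / 2) = n + 1 := by omega
      by_cases hj1 : left + 1 ≤ j ∧ j + (left + 1) < n
      · rw [if_pos hj1, if_pos (by omega)]
      · rw [if_neg hj1]
        by_cases hj2 : left ≤ j ∧ j + left < n
        · rw [if_pos hj2]
          by_cases hje : j = left
          · subst hje
            have h1 : r1[j]? = some (String.singleton (l.getD (2 * j) 'x')) := by
              simp [hr1, List.getElem?_set, hres]; omega
            have hspec : specD l j = l.getD (2 * j) 'x' := by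
              rw [specD, if_pos (by omega)]
            by_cases h2 : 2 * j + 1 < n
            · simp only [hres', if_pos h2]
              rw [List.getElem?_set_ne (by omega), h1, hspec]
            · simp only [hres', if_neg h2, h1, hspec]
          · have hje2 : j = n - 1 - left := by omega
            have h2 : 2 * left + 1 < n := by omega
            simp only [hres', if_pos h2, hrt]
            rw [← hje2, List.getElem?_set_self (by simp [hr1, hres]; omega)]
            have hspec : specD l j = l.getD (2 * left + 1) 'x' := by
              rw [specD, if_neg (by omega)]
              have hlj : l.length - 1 - j = left := by omega
              rw [hlj]
            rw [hspec]
        · rw [if_neg hj2]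
          by_cases h2 : 2 * left + 1 < n
          · simp only [hres', if_pos h2, hrt, hr1]
            rw [List.getElem?_set_ne (by omega), List.getElem?_set_ne (by omega)]
          · simp only [hres', if_neg h2, hr1]
            rw [List.getElem?_set_ne (by omega)]
    · rw [if_neg hc]
      refine ⟨hres, fun j => ?_⟩
      rw [if_neg (by omega)]

lemma evens_getElem? (l : List Char) : ∀ j : Nat, (evens l)[j]? = l[2 * j]? := by
  induction l using evens.induct with
  | case1 => intro j; simp [evens]
  | case2 c =>
    intro j
    match j with
    | 0 => simp [evens]
    | j + 1 =>
      simp only [evens]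
      rw [List.getElem?_eq_none (by simp), List.getElem?_eq_none (by simp; omega)]
  | case3 c d t ih =>
    intro j
    match j with
    | 0 => simp [evens]
    | j + 1 =>
      have h2 : 2 * (j + 1) = 2 * j + 1 + 1 := by ring
      simp only [evens, List.getElem?_cons_succ, h2, ih j]

lemma evens_length (l : List Char) : (evens l).length = (l.length + 1) / 2 := by
  induction l using evens.induct with
  | case1 => simp [evens]
  | case2 c => simp [evens]
  | case3 c d t ih => simp [evens, ih]; omega

lemma filterMap_evens (l : List Char) :
    List.filterMap (fun k => l[2 * k]?) (List.range ((l.length + 1) / 2)) = evens l := by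
  induction l using evens.induct with
  | case1 => simp [evens]
  | case2 c => simp [evens]
  | case3 c d t ih =>
    have hcnt : ((c :: d :: t).length + 1) / 2 = (t.length + 1) / 2 + 1 := by simp; omega
    rw [hcnt, List.range_succ_eq_map, List.filterMap_cons, List.filterMap_map]
    simp only [List.getElem?_cons_zero, Nat.mul_zero]
    show _ = c :: evens t
    rw [← ih]
    refine congrArg (c :: ·) ?_
    apply List.filterMap_congr
    intro k _
    have h2 : 2 * (k + 1) = 2 * k + 1 + 1 := by ring
    simp [Function.comp, h2]

lemma slice?_zero_two (l : List Char) :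
    PySem.List.slice? l (some 0) none 2 = some (evens l) := by
  rw [PySem.List.slice?, PySem.List.sliceIndices]
  norm_num
  have hc : (if 0 < l.length then (((l.length : Int) + 2 - 1) / 2).toNat else 0) = (l.length + 1) / 2 := by
    split_ifs <;> omega
  rw [hc, ← filterMap_evens]
  apply List.filterMap_congr
  intro k _
  have h2 : ((2 * (k : Nat) : Int)).toNat = 2 * k := by omega
  rw [h2]

lemma slice?_one_two (l : List Char) :
    PySem.List.slice? l (some 1) none 2 = some (evens l.tail) := by
  match l with
  | [] => decide
  | c :: rest =>
    rw [PySem.List.slice?, PySem.List.sliceIndices]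
    norm_num
    have hc : (if 0 < rest.length then (((rest.length : Int) + 2 - 1) / 2).toNat else 0) = (rest.length + 1) / 2 := by
      split_ifs <;> omega
    rw [hc, ← filterMap_evens]
    apply List.filterMap_congr
    intro k _
    have h2 : ((1 + 2 * (k : Nat) : Int)).toNat = 2 * k + 1 := by omega
    rw [h2, List.getElem?_cons_succ]

lemma join_singleton (cl : List Char) :
    PySem.Str.join "" (cl.map String.singleton) = String.ofList cl := by
  have h : (PySem.Str.join "" (cl.map String.singleton)).toList = cl := by
    rw [PySem.Str.toList_join]
    simp only [PySem.Chars.join, List.map_map]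
    induction cl with
    | nil => simp [List.intercalate]
    | cons c t ih =>
      simp only [List.map_cons, List.intercalate] at ih ⊢
      cases t <;> simp_all
  conv_rhs => rw [← h]
  rw [String.ofList_toList]


lemma buildB2 (front back : List Char) (hfb2 : front.length ≤ back.length + 1)
    (g : List Char → Nat → List Char)
    (hg : ∀ acc j, g acc j = if j < back.length
        then acc ++ [front.getD j 'x'] ++ [back.getD j 'x'] else acc ++ [front.getD j 'x']) :
    ∀ i, i ≤ front.length →
    ((List.range i).foldl g []).length = i + min i back.length ∧
    ∀ jj : Nat, ((List.range i).foldl g [])[jj]? =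
      if jj < i + min i back.length then
        some (if jj % 2 = 0 then front.getD (jj / 2) 'x' else back.getD (jj / 2) 'x')
      else none := by
  intro i
  induction i with
  | zero => intro _; simp
  | succ i ih =>
    intro hi
    obtain ⟨ihlen, ihget⟩ := ih (by omega)
    rw [List.range_succ, List.foldl_append, List.foldl_cons, List.foldl_nil, hg]
    by_cases hb : i < back.length
    · rw [if_pos hb]
      have hmin : min i back.length = i := by omega
      have hmin' : min (i + 1) back.length = i + 1 := by omega
      rw [hmin'] at *
      rw [hmin] at ihlen ihget
      have hAlen : ((List.range i).foldl g []).length = i + i := ihlen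
      constructor
      · simp [hAlen]; omega
      · intro jj
        rw [List.append_assoc]
        by_cases hjj : jj < i + i
        · rw [List.getElem?_append_left (by omega), ihget jj, if_pos (show jj < i + i by omega),
            if_pos (show jj < i + 1 + (i + 1) by omega)]
        · rw [List.getElem?_append_right (by omega), hAlen]
          by_cases hjj2 : jj = i + i
          · have h0 : jj - (i + i) = 0 := by omega
            rw [h0]
            show some (front.getD i 'x') = _
            rw [if_pos (show jj < i + 1 + (i + 1) by omega), if_pos (by omega : jj % 2 = 0)]
            have hd : jj / 2 = i := by omega
            rw [hd]
          · by_cases hjj3 : jj = i + i + 1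
            · have h1 : jj - (i + i) = 1 := by omega
              rw [h1]
              show some (back.getD i 'x') = _
              rw [if_pos (show jj < i + 1 + (i + 1) by omega), if_neg (by omega : ¬ jj % 2 = 0)]
              have hd : jj / 2 = i := by omega
              rw [hd]
            · have h2 : 2 ≤ jj - (i + i) := by omega
              rw [List.getElem?_eq_none (by simp; omega), if_neg (by omega)]
    · rw [if_neg hb]
      have hieq : i = back.length := by omega
      have hmin : min i back.length = back.length := by omega
      have hmin' : min (i + 1) back.length = back.length := by omega
      rw [hmin'] at *
      rw [hmin] at ihlen ihget
      have hAlen : ((List.range i).foldl g []).length = i + back.length := ihlen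
      constructor
      · simp [hAlen]; omega
      · intro jj
        by_cases hjj : jj < i + back.length
        · rw [List.getElem?_append_left (by omega), ihget jj, if_pos (show jj < i + back.length by omega),
            if_pos (show jj < i + 1 + back.length by omega)]
        · rw [List.getElem?_append_right (by omega), hAlen]
          by_cases hjj2 : jj = i + back.length
          · have h0 : jj - (i + back.length) = 0 := by omega
            rw [h0]
            show some (front.getD i 'x') = _
            rw [if_pos (show jj < i + 1 + back.length by omega), if_pos (by omega : jj % 2 = 0)]
            have hd : jj / 2 = i := by omega
            rw [hd]
          · rw [List.getElem?_eq_none (by simp; omega), if_neg (by omega)]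

lemma get?_eq_some_getD (l : List Char) (i : Nat) (h : i < l.length) :
    l[i]? = some (l.getD i 'x') := by
  rw [List.getD_eq_getElem?_getD, List.getElem?_eq_getElem h]
  rfl

-- B's decode list holds exactly the decode permutation
lemma DL_getElem? (l : List Char) (j : Nat) :
    (evens l ++ (evens l.tail).reverse)[j]? =
      if j < l.length then some (specD l j) else none := by
  set n := l.length with hn
  have hk : (evens l).length = (n + 1) / 2 := evens_length l
  have ht : (evens l.tail).length = n - (n + 1) / 2 := by
    rw [evens_length, List.length_tail]; omega
  by_cases hj : j < (n + 1) / 2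
  · have hjn : j < n := by omega
    rw [List.getElem?_append_left (by omega), evens_getElem? l j,
      get?_eq_some_getD l _ (by omega), if_pos hjn]
    rw [specD, if_pos (by omega)]
  · by_cases hjn : j < n
    · rw [List.getElem?_append_right (by omega), hk,
        List.getElem?_reverse (by omega), ht]
      rw [evens_getElem?, List.getElem?_tail]
      have hidx : 2 * (n - (n + 1) / 2 - 1 - (j - (n + 1) / 2)) + 1 = 2 * (n - 1 - j) + 1 := by
        omega
      rw [hidx, get?_eq_some_getD l _ (by omega), if_pos hjn]
      rw [specD, if_neg (by omega), hn]
    · rw [List.getElem?_eq_none (by simp [hk, ht]; omega), if_neg hjn]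

lemma EL_value (l : List Char) (j : Nat) (hj : j < l.length) :
    (if j % 2 = 0 then (l.take ((l.length + 1) / 2)).getD (j / 2) 'x'
      else ((l.drop ((l.length + 1) / 2)).reverse).getD (j / 2) 'x') = specE l j := by
  set n := l.length with hn
  by_cases hp : j % 2 = 0
  · rw [if_pos hp, specE, if_pos hp]
    rw [List.getD_eq_getElem?_getD, List.getElem?_take, if_pos (by omega),
      ← List.getD_eq_getElem?_getD]
  · rw [if_neg hp, specE, if_neg hp]
    have hd : (List.drop ((n + 1) / 2) l).length = n - (n + 1) / 2 := by
      rw [List.length_drop]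
    have hj2 : j / 2 < n - (n + 1) / 2 := by omega
    rw [List.getD_eq_getElem?_getD, List.getElem?_reverse (by rw [hd]; omega), hd,
      List.getElem?_drop]
    have hidx : (n + 1) / 2 + (n - (n + 1) / 2 - 1 - j / 2) = n - 1 - j / 2 := by omega
    rw [hidx, ← List.getD_eq_getElem?_getD, hn]

theorem circle_cipher_spec : Claim_equal_circle_cipher := by
  intro s is_decode _
  unfold Spec_circle_cipher
  simp only [circle_cipher, circle_cipher_alt]
  set l := s.toList with hl
  set n := l.length with hn
  have e1 : ((n : Int) - 1 - ((0 : Nat) : Int)) = (n : Int) - 1 := by push_cast; ring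
  cases is_decode
  · -- encode
    simp only [Bool.false_eq_true, if_false]
    have hA := loopA_enc l n 0 (List.replicate n "") (by rw [List.length_replicate, hn]) (by omega)
    rw [e1] at hA
    simp only [Nat.mul_zero] at hA
    -- B side
    rw [PySem.List.slice_to_natCast, PySem.List.slice_from_natCast]
    set k := (n + 1) / 2 with hk
    have hkn : k ≤ n := by omega
    have htake : (l.take k).length = k := by rw [List.length_take, ← hn]; omega
    have hdrop : ((l.drop k).reverse).length = n - k := by
      rw [List.length_reverse, List.length_drop, ← hn]
    rw [hdrop]
    have hB := buildB2 (l.take k) ((l.drop k).reverse) (by rw [htake, hdrop]; omega)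
      (fun acc i =>
        let acc' := acc ++ [(l.take k).getD i 'x']
        if i < n - k then acc' ++ [((l.drop k).reverse).getD i 'x'] else acc')
      (fun acc j => by rw [hdrop])
      k (by rw [htake])
    rw [hdrop] at hB
    have hmin : min k (n - k) = n - k := by omega
    rw [hmin] at hB
    obtain ⟨hBlen, hBget⟩ := hB
    have hout : (circleLoopA l (List.replicate n "") 0 ((n : Int) - 1) 0 false) =
        List.map String.singleton ((List.range k).foldl (fun acc i =>
          let acc' := acc ++ [(l.take k).getD i 'x']
          if i < n - k then acc' ++ [((l.drop k).reverse).getD i 'x'] else acc') []) := by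
      apply List.ext_getElem?
      intro j
      rw [hA.2 j, List.getElem?_map, hBget j]
      by_cases hj : j < n
      · rw [if_pos (by omega), if_pos (by omega)]
        simp only [Option.map_some]
        congr 1
        rw [← EL_value l j hj]
      · rw [if_neg (by omega), if_neg (by omega)]
        rw [List.getElem?_eq_none (by simp; omega)]
        rfl
    rw [hout, join_singleton]
  · -- decode
    simp only [if_true]
    have hA := loopA_dec l n 0 (List.replicate n "") (by rw [List.length_replicate, hn]) (by omega)
    rw [e1] at hA
    simp only [Nat.mul_zero] at hA
    rw [slice?_zero_two, slice?_one_two]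
    simp only [Option.getD_some]
    have hout : (circleLoopA l (List.replicate n "") 0 ((n : Int) - 1) 0 true) =
        List.map String.singleton (evens l ++ (evens l.tail).reverse) := by
      apply List.ext_getElem?
      intro j
      rw [hA.2 j, List.getElem?_map, DL_getElem? l j]
      by_cases hj : j < n
      · rw [if_pos (by omega), if_pos (by omega)]
        rfl
      · rw [if_neg (by omega), if_neg (by omega)]
        rw [List.getElem?_eq_none (by simp; omega)]
        rfl
    rw [hout, join_singleton]
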